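-- pv_equiv track=rewrite | github.com/Sectum2010/Elvern | backend/app/services/media_technical_metadata_service.py | _normalize_container
-- ===== SOURCE A (Python) =====
-- def _normalize_text(value: object) -> str | None:
--     if value in {None, ""}:
--         return None
--     text = str(value).strip()
--     return text or None
--
-- def _normalize_token(value: object) -> str | None:
--     text = _normalize_text(value)
--     if text is None:
--         return None
--     return text.lower()
--
-- def _normalize_container(format_name: object) -> str | None:
--     normalized = _normalize_token(format_name)
--     if normalized is None:
--         return None
--     tokens = [token.strip() for token in normalized.split(",") if token.strip()]
--     if not tokens:
--         return None
--     if any(token in {"mov", "mp4", "m4v", "m4a", "3gp", "3g2", "mj2"} for token in tokens):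
--         return "mp4"
--     if "matroska" in tokens:
--         return "mkv"
--     if "webm" in tokens:
--         return "webm"
--     if "avi" in tokens:
--         return "avi"
--     if "mpegts" in tokens or "mpegtsraw" in tokens:
--         return "ts"
--     return tokens[0]
-- ===== SOURCE B (Python) =====
-- _CONTAINER_TABLE = {
--     "mov": (0, "mp4"), "mp4": (0, "mp4"), "m4v": (0, "mp4"), "m4a": (0, "mp4"),
--     "3gp": (0, "mp4"), "3g2": (0, "mp4"), "mj2": (0, "mp4"),
--     "matroska": (1, "mkv"), "webm": (2, "webm"), "avi": (3, "avi"),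
--     "mpegts": (4, "ts"), "mpegtsraw": (4, "ts"),
-- }
--
-- def _normalize_container(format_name):
--     if format_name is None:
--         return None
--     text = str(format_name).strip().lower()
--     tokens = [t.strip() for t in text.split(",") if t.strip()]
--     if not tokens:
--         return None
--     best = None
--     for token in tokens:
--         hit = _CONTAINER_TABLE.get(token)
--         if hit is not None and (best is None or hit[0] < best[0]):
--             best = hit
--     return best[1] if best is not None else tokens[0]
-- ===== Notes on version B (the rewrite author's own statement) =====
-- stated objective: idiomatic
-- what changed: A's five separate membership scans over the token list (a set test plus four if-chain lookups) are replaced by one token->(rank,canonical) table and a single min-rank-tracking pass over the tokens.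
import Mathlib
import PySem

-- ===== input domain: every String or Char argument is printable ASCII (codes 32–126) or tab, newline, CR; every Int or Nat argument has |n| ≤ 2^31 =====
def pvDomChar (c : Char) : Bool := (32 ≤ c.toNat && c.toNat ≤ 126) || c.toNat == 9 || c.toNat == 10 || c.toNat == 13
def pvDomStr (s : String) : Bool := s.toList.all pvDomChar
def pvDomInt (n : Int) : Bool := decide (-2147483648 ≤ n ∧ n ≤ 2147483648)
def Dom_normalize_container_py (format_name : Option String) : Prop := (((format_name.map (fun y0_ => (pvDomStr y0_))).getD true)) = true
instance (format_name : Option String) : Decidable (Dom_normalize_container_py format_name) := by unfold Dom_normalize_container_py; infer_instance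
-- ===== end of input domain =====

-- B replaces A's five separate membership scans with one rank table and a single
-- min-tracking pass over the tokens (objective: idiomatic; not measurably faster).

-- ===== PORT A =====
-- the mp4-family set of A's first `any(... in {...})` test
def pvS0 : List String := ["mov", "mp4", "m4v", "m4a", "3gp", "3g2", "mj2"]

-- A's priority if-chain over the token list (tokens[0] as pyGet? tokens 0)
def pvChainA (tokens : List String) : Option String :=
  if tokens = [] then none
  else if tokens.any (fun t => pvS0.contains t) then some "mp4"
  else if tokens.contains "matroska" then some "mkv"
  else if tokens.contains "webm" then some "webm"
  else if tokens.contains "avi" then some "avi"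
  else if tokens.contains "mpegts" || tokens.contains "mpegtsraw" then some "ts"
  else PySem.List.pyGet? tokens 0

def normalize_container_py (format_name : Option String) : Option String :=
  match format_name with
  | none => none
  | some v =>
    -- `value in {None, ""}` : for a str argument this is the `= ""` test
    if v = "" then none
    -- text := strip v; `text or None`
    else if PySem.Str.strip v = "" then none
    -- normalized := lower text; sep is the literal non-empty ",", so split? always returns some
    else pvChainA ((((PySem.Str.split? (PySem.Str.lower (PySem.Str.strip v)) ",").getD
      []).map PySem.Str.strip).filter (fun t => t ≠ ""))

-- ===== PORT B =====
-- _CONTAINER_TABLE of Source B: token → (rank, canonical)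
def pvTable : PySem.Dict String (Nat × String) := PySem.Dict.ofList
  [("mov", (0, "mp4")), ("mp4", (0, "mp4")), ("m4v", (0, "mp4")), ("m4a", (0, "mp4")),
   ("3gp", (0, "mp4")), ("3g2", (0, "mp4")), ("mj2", (0, "mp4")),
   ("matroska", (1, "mkv")), ("webm", (2, "webm")), ("avi", (3, "avi")),
   ("mpegts", (4, "ts")), ("mpegtsraw", (4, "ts"))]

-- the body of Source B's `for token in tokens` loop
def pvStep (best : Option (Nat × String)) (t : String) : Option (Nat × String) :=
  match pvTable.get? t with
  | none => best
  | some hit =>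
    match best with
    | none => some hit
    | some b => if hit.1 < b.1 then some hit else some b

-- Source B after the tokens comprehension: empty check, the fold, and the final return
def pvLoopB (tokens : List String) : Option String :=
  if tokens = [] then none
  else
    match tokens.foldl pvStep none with
    | some b => some b.2
    | none => PySem.List.pyGet? tokens 0

def normalize_container_py_alt (format_name : Option String) : Option String :=
  match format_name with
  | none => none
  | some v =>
    -- text := lower (strip v); tokens as in Source B, then the single min-tracking pass
    pvLoopB ((((PySem.Str.split? (PySem.Str.lower (PySem.Str.strip v)) ",").getD
      []).map PySem.Str.strip).filter (fun t => t ≠ ""))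

-- ===== PRECONDITION & SPEC =====
def Spec_normalize_container_py (format_name : Option String) (out : Option String) : Prop := out = normalize_container_py_alt format_name
instance (format_name : Option String) (out : Option String) : Decidable (Spec_normalize_container_py format_name out) := by unfold Spec_normalize_container_py; infer_instance

-- ===== CLAIM (what is proved, stated in full; the proofs are below) =====
def Claim_equal_normalize_container_py : Prop := ∀ (format_name : Option String), Dom_normalize_container_py format_name → Spec_normalize_container_py format_name (normalize_container_py format_name)

-- ===== LEMMAS AND PROOFS =====

-- left-biased min by rank: what one pvStep contributes
def pvMerge (a b : Option (Nat × String)) : Option (Nat × String) :=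
  match a, b with
  | none, b => b
  | some x, none => some x
  | some x, some y => if y.1 < x.1 then some y else some x

lemma pvStep_eq_merge (acc : Option (Nat × String)) (t : String) :
    pvStep acc t = pvMerge acc (pvTable.get? t) := by
  unfold pvStep pvMerge
  cases pvTable.get? t <;> cases acc <;> simp

lemma pvMerge_none_right (a : Option (Nat × String)) : pvMerge a none = a := by
  cases a <;> rfl

lemma pvMerge_assoc (a b c : Option (Nat × String)) :
    pvMerge (pvMerge a b) c = pvMerge a (pvMerge b c) := by
  cases a <;> cases b <;> cases c <;>
    simp only [pvMerge] <;> split_ifs <;> simp only [pvMerge] <;> split_ifs <;>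
    first | rfl | omega

lemma pvFold_merge (ts : List String) (acc : Option (Nat × String)) :
    ts.foldl pvStep acc = pvMerge acc (ts.foldl pvStep none) := by
  induction ts generalizing acc with
  | nil => simp [pvMerge_none_right]
  | cons t ts ih =>
    simp only [List.foldl_cons]
    rw [ih (pvStep acc t), ih (pvStep none t), pvStep_eq_merge, pvStep_eq_merge none t,
      pvMerge_assoc]
    rfl

-- the table lookup, written as A's membership tests
lemma pvTable_get (t : String) :
    pvTable.get? t =
      if pvS0.contains t then some (0, "mp4")
      else if t = "matroska" then some (1, "mkv")
      else if t = "webm" then some (2, "webm")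
      else if t = "avi" then some (3, "avi")
      else if t = "mpegts" then some (4, "ts")
      else if t = "mpegtsraw" then some (4, "ts")
      else none := by
  have h : pvTable = PySem.Dict.mk
      [("mov", (0, "mp4")), ("mp4", (0, "mp4")), ("m4v", (0, "mp4")), ("m4a", (0, "mp4")),
       ("3gp", (0, "mp4")), ("3g2", (0, "mp4")), ("mj2", (0, "mp4")),
       ("matroska", (1, "mkv")), ("webm", (2, "webm")), ("avi", (3, "avi")),
       ("mpegts", (4, "ts")), ("mpegtsraw", (4, "ts"))] := by decide
  rw [h]
  simp only [PySem.Dict.get?_mk_cons, pvS0, List.contains_cons, List.contains_nil, beq_iff_eq,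
    Bool.or_eq_true, Bool.or_false]
  by_cases h1 : t = "mov" <;> by_cases h2 : t = "mp4" <;> by_cases h3 : t = "m4v" <;>
    by_cases h4 : t = "m4a" <;> by_cases h5 : t = "3gp" <;> by_cases h6 : t = "3g2" <;>
    by_cases h7 : t = "mj2" <;> simp_all [eq_comm, PySem.Dict.get?]

-- one left-biased rank-min pass = A's five separate scans in priority order
set_option maxHeartbeats 1000000 in
lemma pvFold_chain (ts : List String) :
    ts.foldl pvStep none =
      if ts.any (fun t => pvS0.contains t) then some ((0 : Nat), "mp4")
      else if ts.contains "matroska" then some (1, "mkv")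
      else if ts.contains "webm" then some (2, "webm")
      else if ts.contains "avi" then some (3, "avi")
      else if ts.contains "mpegts" || ts.contains "mpegtsraw" then some (4, "ts")
      else none := by
  induction ts with
  | nil => simp
  | cons t ts ih =>
    rw [List.foldl_cons, pvFold_merge, ih, pvStep_eq_merge, pvTable_get]
    clear ih
    simp only [List.any_cons, List.contains_cons]
    by_cases c0 : pvS0.contains t
    · simp only [c0, Bool.true_or, eq_self_iff_true, if_true]
      split_ifs <;> simp_all [pvMerge]
    · simp only [Bool.not_eq_true] at c0
      simp only [c0, Bool.false_or]
      by_cases c1 : t = "matroska"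
      · subst c1
        simp only [show (("matroska" == "matroska") : Bool) = true from rfl,
          show (("webm" == "matroska") : Bool) = false from rfl,
          show (("avi" == "matroska") : Bool) = false from rfl,
          show (("mpegts" == "matroska") : Bool) = false from rfl,
          show (("mpegtsraw" == "matroska") : Bool) = false from rfl,
          Bool.true_or, Bool.false_or, eq_self_iff_true, if_true]
        split_ifs <;> simp_all [pvMerge]
      · have a1 : (("matroska" == t) : Bool) = false := by
          rw [beq_eq_false_iff_ne]; exact fun h => c1 h.symm
        simp only [a1, Bool.false_or, c1, if_false]
        by_cases c2 : t = "webm"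
        · subst c2
          simp only [show (("webm" == "webm") : Bool) = true from rfl,
            show (("avi" == "webm") : Bool) = false from rfl,
            show (("mpegts" == "webm") : Bool) = false from rfl,
            show (("mpegtsraw" == "webm") : Bool) = false from rfl,
            Bool.true_or, Bool.false_or, eq_self_iff_true, if_true]
          split_ifs <;> simp_all [pvMerge]
        · have a2 : (("webm" == t) : Bool) = false := by
            rw [beq_eq_false_iff_ne]; exact fun h => c2 h.symm
          simp only [a2, Bool.false_or, c2, if_false]
          by_cases c3 : t = "avi"
          · subst c3
            simp only [show (("avi" == "avi") : Bool) = true from rfl,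
              show (("mpegts" == "avi") : Bool) = false from rfl,
              show (("mpegtsraw" == "avi") : Bool) = false from rfl,
              Bool.true_or, Bool.false_or, eq_self_iff_true, if_true]
            split_ifs <;> simp_all [pvMerge]
          · have a3 : (("avi" == t) : Bool) = false := by
              rw [beq_eq_false_iff_ne]; exact fun h => c3 h.symm
            simp only [a3, Bool.false_or, c3, if_false]
            by_cases c4 : t = "mpegts"
            · subst c4
              simp only [show (("mpegts" == "mpegts") : Bool) = true from rfl,
                show (("mpegtsraw" == "mpegts") : Bool) = false from rfl,
                Bool.true_or, Bool.false_or, eq_self_iff_true, if_true]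
              split_ifs <;> simp_all [pvMerge]
            · have a4 : (("mpegts" == t) : Bool) = false := by
                rw [beq_eq_false_iff_ne]; exact fun h => c4 h.symm
              simp only [a4, Bool.false_or, c4, if_false]
              by_cases c5 : t = "mpegtsraw"
              · subst c5
                simp only [show (("mpegtsraw" == "mpegtsraw") : Bool) = true from rfl,
                  Bool.or_true, eq_self_iff_true, if_true]
                split_ifs <;> simp_all [pvMerge]
              · have a5 : (("mpegtsraw" == t) : Bool) = false := by
                  rw [beq_eq_false_iff_ne]; exact fun h => c5 h.symm
                simp only [a5, Bool.false_or, c5, if_false]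
                rfl

-- the two per-token-list computations agree
lemma pvChain_eq_loop (ts : List String) : pvChainA ts = pvLoopB ts := by
  unfold pvChainA pvLoopB
  rw [pvFold_chain]
  by_cases he : ts = []
  · simp [he]
  · simp only [he, if_false]
    split_ifs <;> rfl

theorem pv_main (format_name : Option String) :
    normalize_container_py format_name = normalize_container_py_alt format_name := by
  cases format_name with
  | none => rfl
  | some v =>
    simp only [normalize_container_py, normalize_container_py_alt]
    by_cases hv : v = ""
    · subst hv; decide
    · rw [if_neg hv]
      by_cases hs : PySem.Str.strip v = ""
      · rw [if_pos hs, hs]; decide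
      · rw [if_neg hs, pvChain_eq_loop]

-- ===== VERDICT (by name: the statement is the Claim_ definition above) =====
theorem normalize_container_py_spec : Claim_equal_normalize_container_py := by
  intro format_name _
  unfold Spec_normalize_container_py
  exact pv_main format_name
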